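-- pv_equiv track=rewrite | github.com/kevincovey/T-Tauri | Modules/functions.py | Uniqueness_Filter
-- ===== SOURCE A (Python) =====
-- def Uniqueness_Filter(array, locid, twomassid):
--
--     state = 0
--
--     for a,b in array:
--
--         if a != locid and b != twomassid:
--             state = 1
--
--         elif a != locid and b == twomassid:
--             state = 0
--
--     return state
-- ===== SOURCE B (Python) =====
-- def Uniqueness_Filter(array, locid, twomassid):
--     # Scan BACKWARDS and stop at the first pair whose first element differs
--     # from locid: that pair alone decides the flag. No running state, and
--     # typically only a suffix of the array is examined.
--     for a, b in reversed(array):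
--         if a != locid:
--             return 0 if b == twomassid else 1
--     return 0
-- ===== Notes on version B (the rewrite author's own statement) =====
-- stated objective: alternative
-- what changed: A does a full forward pass rewriting a state flag at every qualifying pair; B scans backwards and returns immediately at the first pair with a != locid, so it keeps no state and usually inspects only a suffix of the array.
import Mathlib
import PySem

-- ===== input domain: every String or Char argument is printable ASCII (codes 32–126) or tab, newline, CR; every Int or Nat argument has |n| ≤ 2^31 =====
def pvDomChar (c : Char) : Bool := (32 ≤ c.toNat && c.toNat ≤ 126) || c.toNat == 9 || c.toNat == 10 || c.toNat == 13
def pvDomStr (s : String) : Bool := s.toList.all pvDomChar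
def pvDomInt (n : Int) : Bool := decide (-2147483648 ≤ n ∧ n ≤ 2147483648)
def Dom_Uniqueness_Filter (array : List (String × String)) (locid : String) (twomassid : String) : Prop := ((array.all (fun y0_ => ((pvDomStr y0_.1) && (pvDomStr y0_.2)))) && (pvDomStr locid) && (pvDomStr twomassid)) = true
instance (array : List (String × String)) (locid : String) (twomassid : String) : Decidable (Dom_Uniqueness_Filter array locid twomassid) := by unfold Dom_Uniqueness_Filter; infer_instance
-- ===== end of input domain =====

-- ===== PORT A =====
-- header: B replaces A's full forward pass with a backward scan that returns at the first pair whose first element differs from locid (alternative decomposition, same worst-case cost).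
def Uniqueness_Filter (array : List (String × String)) (locid : String) (twomassid : String) : Int :=
  array.foldl (fun state ab =>
    if ab.1 ≠ locid ∧ ab.2 ≠ twomassid then 1
    else if ab.1 ≠ locid ∧ ab.2 = twomassid then 0
    else state) 0

-- ===== PORT B =====
-- early-exit loop over the reversed list: first qualifying pair decides
def pvAltScan (locid twomassid : String) : List (String × String) → Int
  | [] => 0
  | (a, b) :: rest =>
    if a ≠ locid then (if b = twomassid then 0 else 1)
    else pvAltScan locid twomassid rest

def Uniqueness_Filter_alt (array : List (String × String)) (locid : String) (twomassid : String) : Int :=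
  pvAltScan locid twomassid array.reverse

-- ===== PRECONDITION & SPEC =====
def Spec_Uniqueness_Filter (array : List (String × String)) (locid : String) (twomassid : String) (out : Int) : Prop := out = Uniqueness_Filter_alt array locid twomassid
instance (array : List (String × String)) (locid : String) (twomassid : String) (out : Int) : Decidable (Spec_Uniqueness_Filter array locid twomassid out) := by unfold Spec_Uniqueness_Filter; infer_instance

-- ===== CLAIM (what is proved, stated in full; the proofs are below) =====
def Claim_equal_Uniqueness_Filter : Prop := ∀ (array : List (String × String)) (locid : String) (twomassid : String), Dom_Uniqueness_Filter array locid twomassid → Spec_Uniqueness_Filter array locid twomassid (Uniqueness_Filter array locid twomassid)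

-- ===== LEMMAS AND PROOFS =====
theorem key (array : List (String × String)) (locid twomassid : String) :
    Uniqueness_Filter array locid twomassid = Uniqueness_Filter_alt array locid twomassid := by
  induction array using List.reverseRecOn with
  | nil => rfl
  | append_singleton xs x ih =>
    obtain ⟨a, b⟩ := x
    simp only [Uniqueness_Filter, Uniqueness_Filter_alt, List.foldl_append, List.foldl_cons,
      List.foldl_nil, List.reverse_append, List.reverse_cons, List.reverse_nil,
      List.nil_append, List.cons_append, pvAltScan] at *
    by_cases h1 : a = locid
    · simp [h1] at *; exact ih
    · by_cases h2 : b = twomassid <;> simp [h1, h2]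

-- ===== VERDICT (by name: the statement is the Claim_ definition above) =====
theorem Uniqueness_Filter_spec : Claim_equal_Uniqueness_Filter := by
  intro array locid twomassid _
  unfold Spec_Uniqueness_Filter
  exact key array locid twomassid
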